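-- pv_equiv track=rewrite | github.com/Liuyuyong0414/KATE | KATE/offline/utils.py | return_the_first_to_end
-- ===== SOURCE A (Python) =====
-- def return_the_first_to_end(edit_seqs):
--     start = -1
--     end = -1
--     for idx, line in enumerate(edit_seqs):
--         if line.startswith('+') or line.startswith('-'):
--             if start == -1:
--                 start = idx
--             end = idx
--     if start != -1 and end != -1 and start <= end:
--         return [i.strip() for i in edit_seqs[start:end + 1]]
--     else:
--         raise ValueError("edit seq not have + or -???")
-- ===== SOURCE B (Python) =====
-- def return_the_first_to_end(edit_seqs):
--     n = len(edit_seqs)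
--     first = None
--     for i in range(n):
--         line = edit_seqs[i]
--         if line.startswith('+') or line.startswith('-'):
--             first = i
--             break
--     if first is None:
--         raise ValueError("edit seq not have + or -???")
--     last = first
--     for i in range(n - 1, first, -1):
--         line = edit_seqs[i]
--         if line.startswith('+') or line.startswith('-'):
--             last = i
--             break
--     return [i.strip() for i in edit_seqs[first:last + 1]]
-- ===== Notes on version B (the rewrite author's own statement) =====
-- stated objective: alternative
-- what changed: Replaces A's single accumulating pass over the whole list with two directional early-exit searches: a forward scan for the first '+'/'-' line and a backward scan (from the end, stopping at first) for the last one.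
import Mathlib
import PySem

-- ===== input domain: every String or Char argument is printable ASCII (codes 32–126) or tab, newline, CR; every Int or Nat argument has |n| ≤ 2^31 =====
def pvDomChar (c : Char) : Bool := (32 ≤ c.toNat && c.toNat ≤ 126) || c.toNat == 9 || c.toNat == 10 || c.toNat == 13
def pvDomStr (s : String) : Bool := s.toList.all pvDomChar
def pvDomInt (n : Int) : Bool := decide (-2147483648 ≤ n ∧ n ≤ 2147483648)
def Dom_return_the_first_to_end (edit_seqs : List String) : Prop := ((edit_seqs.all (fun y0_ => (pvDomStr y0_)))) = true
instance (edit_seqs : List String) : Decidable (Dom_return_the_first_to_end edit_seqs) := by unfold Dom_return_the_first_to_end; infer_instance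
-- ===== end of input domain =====

-- B replaces A's single accumulating pass with two directional early-exit searches
-- (forward for the first '+'/'-' line, backward for the last); alternative decomposition, same cost.


-- line.startswith('+') or line.startswith('-')  (shared test, identical in A and B)
def startsPM (l : String) : Bool := PySem.Str.startswith l "+" || PySem.Str.startswith l "-"

-- ===== PORT A =====
-- the 'for idx, line in enumerate(edit_seqs)' loop, carrying (start, end) (Python ints, -1 sentinels)
def loopA : List String → Nat → Int × Int → Int × Int
  | [], _, st => st
  | l :: rest, idx, st =>
      loopA rest (idx + 1)
        (if startsPM l then (if st.1 = -1 then (idx : Int) else st.1, (idx : Int)) else st)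

def return_the_first_to_end (edit_seqs : List String) : List String :=
  let st := loopA edit_seqs 0 (-1, -1)
  if st.1 ≠ -1 ∧ st.2 ≠ -1 ∧ st.1 ≤ st.2 then
    (PySem.List.slice edit_seqs (some st.1) (some (st.2 + 1))).map PySem.Str.strip
  else []  -- Python raises ValueError here; excluded by Pre_

-- ===== PORT B =====
-- forward scan: index of the first line starting with '+'/'-'
def findFwdPM : List String → Nat → Option Nat
  | [], _ => none
  | l :: rest, i => if startsPM l then some i else findFwdPM rest (i + 1)

-- backward scan: 'for i in range(n-1, first, -1)' with early break; index i always in range when tested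
def scanBackPM (edit_seqs : List String) (first : Nat) : Nat → Nat
  | 0 => first
  | i + 1 =>
      if i + 1 ≤ first then first
      else if startsPM (edit_seqs.getD (i + 1) "") then i + 1
      else scanBackPM edit_seqs first i

def return_the_first_to_end_alt (edit_seqs : List String) : List String :=
  match findFwdPM edit_seqs 0 with
  | none => []  -- Python raises ValueError here; excluded by Pre_
  | some first =>
      let last := scanBackPM edit_seqs first (edit_seqs.length - 1)
      (PySem.List.slice edit_seqs (some (first : Int)) (some ((last : Int) + 1))).map PySem.Str.strip

-- ===== PRECONDITION & SPEC =====
-- Pre_ excludes exactly the inputs with no line starting with '+' or '-', on which A raises ValueError.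
def Pre_return_the_first_to_end (edit_seqs : List String) : Prop :=
  edit_seqs.any (fun l => PySem.Str.startswith l "+" || PySem.Str.startswith l "-") = true
instance (edit_seqs : List String) : Decidable (Pre_return_the_first_to_end edit_seqs) := by
  unfold Pre_return_the_first_to_end; infer_instance

def pvWitness_return_the_first_to_end : List String := ["x", "+a", "y", "- b"]

def Spec_return_the_first_to_end (edit_seqs : List String) (out : List String) : Prop :=
  out = return_the_first_to_end_alt edit_seqs
instance (edit_seqs : List String) (out : List String) : Decidable (Spec_return_the_first_to_end edit_seqs out) := by
  unfold Spec_return_the_first_to_end; infer_instance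

-- ===== CLAIM (what is proved, stated in full; the proofs are below) =====
def Claim_equal_return_the_first_to_end : Prop := ∀ (edit_seqs : List String), Dom_return_the_first_to_end edit_seqs → Pre_return_the_first_to_end edit_seqs → Spec_return_the_first_to_end edit_seqs (return_the_first_to_end edit_seqs)

-- ===== LEMMAS AND PROOFS =====

-- last matching index (proof-side characterisation of A's 'end' accumulator)
def lastIdx? : List String → Nat → Option Nat
  | [], _ => none
  | l :: rest, k =>
      match lastIdx? rest (k + 1) with
      | some j => some j
      | none => if startsPM l then some k else none

theorem loopA_fst : ∀ (xs : List String) (k : Nat) (st : Int × Int),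
    (loopA xs k st).1 =
      if st.1 = -1 then (match findFwdPM xs k with | none => -1 | some f => (f : Int)) else st.1 := by
  intro xs
  induction xs with
  | nil => intro k st; simp [loopA, findFwdPM]
  | cons l rest ih =>
    intro k st
    simp only [loopA, findFwdPM]
    rw [ih]
    by_cases hm : startsPM l
    · by_cases h1 : st.1 = -1
      · simp [hm, h1]
      · simp [hm, h1]
    · simp [hm]

theorem loopA_snd : ∀ (xs : List String) (k : Nat) (st : Int × Int),
    (loopA xs k st).2 =
      match lastIdx? xs k with | none => st.2 | some j => (j : Int) := by
  intro xs
  induction xs with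
  | nil => intro k st; simp [loopA, lastIdx?]
  | cons l rest ih =>
    intro k st
    simp only [loopA, lastIdx?]
    rw [ih]
    by_cases hm : startsPM l <;> cases h : lastIdx? rest (k + 1) <;> simp [hm]

theorem lastIdx?_none : ∀ (xs : List String) (k : Nat),
    lastIdx? xs k = none → ∀ j, j < xs.length → startsPM (xs.getD j "") = false := by
  intro xs
  induction xs with
  | nil => intro k _ j hj; simp at hj
  | cons l rest ih =>
    intro k h j hj
    simp only [lastIdx?] at h
    cases hr : lastIdx? rest (k + 1) with
    | some j' => rw [hr] at h; simp at h
    | none =>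
      rw [hr] at h
      by_cases hm : startsPM l
      · simp [hm] at h
      · cases j with
        | zero => simpa using hm
        | succ j' =>
          simp only [List.getD, List.getElem?_cons_succ]
          exact ih (k + 1) hr j' (by simpa using hj)

theorem lastIdx?_char : ∀ (xs : List String) (k L : Nat),
    lastIdx? xs k = some L →
      k ≤ L ∧ L - k < xs.length ∧ startsPM (xs.getD (L - k) "") = true ∧
      ∀ j, L - k < j → j < xs.length → startsPM (xs.getD j "") = false := by
  intro xs
  induction xs with
  | nil => intro k L h; simp [lastIdx?] at h
  | cons l rest ih =>
    intro k L h
    simp only [lastIdx?] at h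
    cases hr : lastIdx? rest (k + 1) with
    | some j =>
      rw [hr] at h
      cases h
      obtain ⟨hk, hlen, hmatch, hafter⟩ := ih (k + 1) L hr
      have hLk : L - k = (L - (k + 1)) + 1 := by omega
      refine ⟨by omega, by simp; omega, ?_, ?_⟩
      · rw [hLk]; simpa using hmatch
      · intro j hj hjlen
        cases j with
        | zero => omega
        | succ j' =>
          simp only [List.getD, List.getElem?_cons_succ]
          exact hafter j' (by omega) (by simpa using hjlen)
    | none =>
      rw [hr] at h
      by_cases hm : startsPM l
      · rw [if_pos hm] at h
        cases h
        refine ⟨le_refl _, by simp, by simpa using hm, ?_⟩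
        intro j hj hjlen
        cases j with
        | zero => omega
        | succ j' =>
          simp only [List.getD, List.getElem?_cons_succ]
          exact lastIdx?_none rest (k + 1) hr j' (by simpa using hjlen)
      · simp [hm] at h

-- if a first match exists, a last match exists and first ≤ last
theorem findFwd_lastIdx : ∀ (xs : List String) (k f : Nat),
    findFwdPM xs k = some f → ∃ L, lastIdx? xs k = some L ∧ f ≤ L := by
  intro xs
  induction xs with
  | nil => intro k f h; simp [findFwdPM] at h
  | cons l rest ih =>
    intro k f h
    simp only [findFwdPM] at h
    by_cases hm : startsPM l
    · rw [if_pos hm] at h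
      cases h
      simp only [lastIdx?]
      cases hr : lastIdx? rest (k + 1) with
      | some j =>
        obtain ⟨hk, _, _, _⟩ := lastIdx?_char rest (k + 1) j hr
        exact ⟨j, rfl, by omega⟩
      | none => exact ⟨k, by simp [hm], le_refl _⟩
    · rw [if_neg hm] at h
      obtain ⟨L, hL, hfL⟩ := ih (k + 1) f h
      simp only [lastIdx?, hL]
      exact ⟨L, rfl, hfL⟩

theorem any_findFwd : ∀ (xs : List String),
    xs.any (fun l => PySem.Str.startswith l "+" || PySem.Str.startswith l "-") = true →
    ∀ k, ∃ f, findFwdPM xs k = some f := by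
  intro xs
  induction xs with
  | nil => intro h; simp at h
  | cons l rest ih =>
    intro h k
    by_cases hm : startsPM l
    · exact ⟨k, by simp [findFwdPM, hm]⟩
    · have : rest.any (fun l => PySem.Str.startswith l "+" || PySem.Str.startswith l "-") = true := by
        simp only [List.any_cons] at h
        have hm' : (PySem.Str.startswith l "+" || PySem.Str.startswith l "-") = false := by
          simpa [startsPM] using hm
        rw [hm'] at h; simpa using h
      obtain ⟨f, hf⟩ := ih this (k + 1)
      exact ⟨f, by simp [findFwdPM, hm, hf]⟩

theorem scanBack_eq : ∀ (xs : List String) (first L : Nat),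
    first ≤ L → startsPM (xs.getD L "") = true →
    (∀ j, L < j → j < xs.length → startsPM (xs.getD j "") = false) →
    ∀ i, L ≤ i → i < xs.length → scanBackPM xs first i = L := by
  intro xs first L hfL hmL habove i
  induction i with
  | zero =>
    intro hLi _
    simp only [scanBackPM]
    omega
  | succ i ih =>
    intro hLi hilen
    simp only [scanBackPM]
    by_cases h1 : i + 1 ≤ first
    · rw [if_pos h1]; omega
    · rw [if_neg h1]
      by_cases h2 : startsPM (xs.getD (i + 1) "") = true
      · rw [if_pos h2]
        by_contra hne
        have := habove (i + 1) (by omega) hilen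
        rw [h2] at this; exact absurd this (by simp)
      · rw [if_neg h2]
        have hLne : L ≠ i + 1 := fun he => h2 (he ▸ hmL)
        exact ih (by omega) (by omega)

-- ===== VERDICT (by name: the statement is the Claim_ definition above) =====
theorem return_the_first_to_end_spec : Claim_equal_return_the_first_to_end := by
  intro xs _ hpre
  unfold Spec_return_the_first_to_end return_the_first_to_end return_the_first_to_end_alt
  obtain ⟨f, hf⟩ := any_findFwd xs hpre 0
  obtain ⟨L, hL, hfL⟩ := findFwd_lastIdx xs 0 f hf
  obtain ⟨_, hLlen, hmL, habove⟩ := lastIdx?_char xs 0 L hL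
  simp only [Nat.sub_zero] at hLlen hmL habove
  have hn : 1 ≤ xs.length := by omega
  have hscan : scanBackPM xs f (xs.length - 1) = L :=
    scanBack_eq xs f L hfL hmL habove (xs.length - 1) (by omega) (by omega)
  have h1 : (loopA xs 0 (-1, -1)).1 = (f : Int) := by rw [loopA_fst]; simp [hf]
  have h2 : (loopA xs 0 (-1, -1)).2 = (L : Int) := by rw [loopA_snd]; simp [hL]
  simp only [hf, h1, h2, hscan]
  rw [if_pos ⟨by omega, by omega, by exact_mod_cast hfL⟩]
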